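-- pv_equiv track=rewrite | github.com/BartvonMeijenfeldt/advent_of_code_2023 | 6/part2.py | _find_last_beats_record
-- ===== SOURCE A (Python) =====
-- def _find_last_beats_record(a, b, time, record) -> int:
--     m = (a + b) // 2
--     m_beats_record = beats_record(m, time, record)
--     next_beats_record = beats_record(m + 1, time, record)
--     if m_beats_record and not next_beats_record:
--         return m
--
--     if m_beats_record:
--         a = m + 1
--     else:
--         b = m - 1
--
--     return _find_last_beats_record(a, b, time, record)
--
-- def beats_record(i, time, record) -> bool:
--     return i * (time - i) > record
-- ===== SOURCE B (Python) =====
-- def _find_last_beats_record(a, b, time, record) -> int: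
--     # Closed form instead of search: beats_record(i) <=> (2*i - time)**2 <= d
--     # with d = time**2 - 4*record - 1 (discriminant of i*(time-i) > record),
--     # so the last beating i is (time + isqrt(d)) // 2.  The closed form never
--     # looks at the interval, so check the bracketing contract [a, b] explicitly
--     # (A's search diverges when it is violated).
--     if not (a <= b and beats_record(a, time, record)
--             and not beats_record(b + 1, time, record)):
--         raise ValueError("[a, b] must bracket the last record-beating i")
--     d = time * time - 4 * record - 1
--     s = _isqrt(d)
--     return (time + s) // 2
--
-- def _isqrt(n):
--     # floor square root by bisection on [0, n] (returns 0 for n <= 0)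
--     lo, hi = 0, n
--     while lo < hi:
--         mid = (lo + hi + 1) // 2
--         if mid * mid <= n:
--             lo = mid
--         else:
--             hi = mid - 1
--     return lo
--
-- def beats_record(i, time, record) -> bool:
--     return i * (time - i) > record
-- ===== Notes on version B (the rewrite author's own statement) =====
-- stated objective: alternative
-- what changed: Replaced A's recursive binary search over [a,b] by a closed-form computation: beats_record(i) iff (2i-time)^2 <= time^2-4*record-1, so B checks the bracketing contract, computes the discriminant, takes its integer square root (bisection isqrt helper) and returns (time+isqrt(d))//2, never probing the interval.
-- outside the precondition, e.g. on _find_last_beats_record(1, 2, -8, -3): A returns 0, B raises ValueError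
import Mathlib
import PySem

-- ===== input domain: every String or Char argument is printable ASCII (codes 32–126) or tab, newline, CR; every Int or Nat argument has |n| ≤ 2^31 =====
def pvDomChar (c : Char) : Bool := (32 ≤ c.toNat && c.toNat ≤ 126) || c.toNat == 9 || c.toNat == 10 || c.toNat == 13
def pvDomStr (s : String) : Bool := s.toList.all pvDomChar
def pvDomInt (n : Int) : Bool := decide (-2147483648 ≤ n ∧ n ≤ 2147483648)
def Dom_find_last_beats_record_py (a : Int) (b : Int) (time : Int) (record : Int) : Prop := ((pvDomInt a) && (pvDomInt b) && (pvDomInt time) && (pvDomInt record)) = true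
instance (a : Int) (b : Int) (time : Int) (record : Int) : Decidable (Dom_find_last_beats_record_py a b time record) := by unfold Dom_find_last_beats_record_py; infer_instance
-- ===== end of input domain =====

-- B replaces A's recursive binary search by a closed form: discriminant + integer square
-- root (bisection isqrt); the claim covers the bracketing inputs Pre_ on which A returns.

-- ===== PORT A =====
def beatsRecordPy (i : Int) (time : Int) (record : Int) : Bool :=
  decide (i * (time - i) > record)

-- Fuel-guarded transliteration of A's recursion; the fuel only makes the same
-- computation total (under Pre_ it never runs out, see goA_fuel_spec below).
def goA (fuel : Nat) (a : Int) (b : Int) (time : Int) (record : Int) : Int :=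
  match fuel with
  | 0 => a
  | fuel + 1 =>
    let m := PySem.Int.floordiv (a + b) 2
    let m_beats_record := beatsRecordPy m time record
    let next_beats_record := beatsRecordPy (m + 1) time record
    if m_beats_record && !next_beats_record then m
    else if m_beats_record then goA fuel (m + 1) b time record
    else goA fuel a (m - 1) time record

def find_last_beats_record_py (a : Int) (b : Int) (time : Int) (record : Int) : Int :=
  goA ((b - a).toNat + 200) a b time record

-- ===== PORT B =====
-- Fuel-guarded transliteration of B's bisection isqrt loop (hi - lo shrinks each
-- step, so fuel n.toNat + 1 is never exhausted; the fuel only makes it total).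
def isqrtB (fuel : Nat) (lo : Int) (hi : Int) (n : Int) : Int :=
  match fuel with
  | 0 => lo
  | fuel + 1 =>
    if lo < hi then
      let mid := PySem.Int.floordiv (lo + hi + 1) 2
      if mid * mid ≤ n then isqrtB fuel mid hi n
      else isqrtB fuel lo (mid - 1) n
    else lo

def closedFormB (time : Int) (record : Int) : Int :=
  let d := time * time - 4 * record - 1
  let s := isqrtB (d.toNat + 1) 0 d d
  PySem.Int.floordiv (time + s) 2

def find_last_beats_record_py_alt (a : Int) (b : Int) (time : Int) (record : Int) : Int :=
  if decide (a ≤ b) && beatsRecordPy a time record && !beatsRecordPy (b + 1) time record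
  then closedFormB time record
  else 0  -- Python B raises ValueError here (contract violated); outside Pre_, nothing claimed

-- ===== PRECONDITION & SPEC =====
-- Pre_ is the bracketing contract [a, b] under which the helper is called: a beats the
-- record and b+1 does not.  Outside it A may recurse forever (RecursionError); on the
-- excluded inputs where A's wandering search does still stumble on the unique boundary
-- and return it, B returns that same boundary (see the cite), but A's termination there
-- is not a closed-form condition, so those inputs stay outside the claim.
def Pre_find_last_beats_record_py (a : Int) (b : Int) (time : Int) (record : Int) : Prop :=
  a ≤ b ∧ record < a * (time - a) ∧ ¬ record < (b + 1) * (time - (b + 1))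
instance (a : Int) (b : Int) (time : Int) (record : Int) : Decidable (Pre_find_last_beats_record_py a b time record) := by unfold Pre_find_last_beats_record_py; infer_instance

def pvWitness_find_last_beats_record_py : Int × Int × Int × Int := (10, 105, 100, -5)

def Spec_find_last_beats_record_py (a : Int) (b : Int) (time : Int) (record : Int) (out : Int) : Prop := out = find_last_beats_record_py_alt a b time record
instance (a : Int) (b : Int) (time : Int) (record : Int) (out : Int) : Decidable (Spec_find_last_beats_record_py a b time record out) := by unfold Spec_find_last_beats_record_py; infer_instance

-- ===== CLAIM (what is proved, stated in full; the proofs are below) =====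
def Claim_equal_find_last_beats_record_py : Prop := ∀ (a : Int) (b : Int) (time : Int) (record : Int), Dom_find_last_beats_record_py a b time record → Pre_find_last_beats_record_py a b time record → Spec_find_last_beats_record_py a b time record (find_last_beats_record_py a b time record)

-- ===== LEMMAS AND PROOFS =====

-- i*(time-i) is concave, so {i | beats} is contiguous.
lemma beats_contig (t r i j k : Int) (hij : i ≤ j) (hjk : j ≤ k)
    (hi : r < i * (t - i)) (hk : r < k * (t - k)) : r < j * (t - j) := by
  rcases eq_or_lt_of_le (hij.trans hjk) with h | hik
  · have hji : j = i := by omega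
    subst hji; exact hi
  · by_contra hj
    rw [not_lt] at hj
    have hA : (k - j) * (r + 1) ≤ (k - j) * (i * (t - i)) :=
      mul_le_mul_of_nonneg_left (by omega) (by omega)
    have hB : (j - i) * (r + 1) ≤ (j - i) * (k * (t - k)) :=
      mul_le_mul_of_nonneg_left (by omega) (by omega)
    have hC : 0 ≤ (j - i) * (k - j) * (k - i) :=
      mul_nonneg (mul_nonneg (by omega) (by omega)) (by omega)
    have hid : (k - i) * (j * (t - j)) =
        (k - j) * (i * (t - i)) + (j - i) * (k * (t - k)) + (j - i) * (k - j) * (k - i) := by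
      ring
    have hL : (k - i) * (j * (t - j)) ≤ (k - i) * r :=
      mul_le_mul_of_nonneg_left hj (by omega)
    have hE : (k - i) * (r + 1) = (k - i) * r + (k - i) := by ring
    linarith

-- there is at most one boundary point m with beats m ∧ ¬ beats (m+1)
lemma boundary_uniq (t r m₁ m₂ : Int)
    (h₁ : r < m₁ * (t - m₁)) (h₁' : ¬ r < (m₁ + 1) * (t - (m₁ + 1)))
    (h₂ : r < m₂ * (t - m₂)) (h₂' : ¬ r < (m₂ + 1) * (t - (m₂ + 1))) : m₁ = m₂ := by
  by_contra hne
  rcases lt_or_gt_of_ne hne with h | h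
  · exact h₁' (beats_contig t r m₁ (m₁ + 1) m₂ (by omega) (by omega) h₁ h₂)
  · exact h₂' (beats_contig t r m₂ (m₂ + 1) m₁ (by omega) (by omega) h₂ h₁)

lemma goA_fuel_spec (t r : Int) : ∀ (fuel : Nat) (a b : Int), a ≤ b →
    r < a * (t - a) → ¬ r < (b + 1) * (t - (b + 1)) → b - a < (fuel : Int) →
    r < goA fuel a b t r * (t - goA fuel a b t r) ∧
      ¬ r < (goA fuel a b t r + 1) * (t - (goA fuel a b t r + 1)) := by
  intro fuel
  induction fuel with
  | zero => intro a b hab _ _ hf; exfalso; omega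
  | succ f ih =>
    intro a b hab hPa hPb hf
    obtain ⟨hma, hmb⟩ := PySem.Int.floordiv_two_mid_bounds hab
    rw [PySem.Int.floordiv_eq_ediv_of_pos (by omega)] at hma hmb
    by_cases hPm : r < (a + b) / 2 * (t - (a + b) / 2)
    · by_cases hPm1 : r < ((a + b) / 2 + 1) * (t - ((a + b) / 2 + 1))
      · have hne : (a + b) / 2 + 1 ≠ b + 1 := fun h => hPb (h ▸ hPm1)
        simpa [goA, beatsRecordPy, hPm, hPm1] using
          ih ((a + b) / 2 + 1) b (by omega) hPm1 hPb (by omega)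
      · simp [goA, beatsRecordPy, hPm, hPm1]
    · have hne : (a + b) / 2 ≠ a := by intro h; rw [h] at hPm; exact hPm hPa
      have hrec := ih a ((a + b) / 2 - 1) (by omega) hPa (by simpa using hPm) (by omega)
      simpa [goA, beatsRecordPy, hPm] using hrec

-- bisection isqrt: under the invariant lo² ≤ n < (hi+1)² it returns s with s² ≤ n < (s+1)²
lemma isqrtB_spec (n : Int) : ∀ (fuel : Nat) (lo hi : Int), 0 ≤ lo → lo ≤ hi →
    lo * lo ≤ n → n < (hi + 1) * (hi + 1) → hi - lo < (fuel : Int) →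
    isqrtB fuel lo hi n * isqrtB fuel lo hi n ≤ n ∧
      n < (isqrtB fuel lo hi n + 1) * (isqrtB fuel lo hi n + 1) := by
  intro fuel
  induction fuel with
  | zero => intro lo hi _ _ _ _ hf; exfalso; omega
  | succ f ih =>
    intro lo hi hlo hlh hlosq hhisq hf
    by_cases hlt : lo < hi
    · have hbounds := PySem.Int.floordiv_two_mid_bounds (show lo + 1 ≤ hi by omega)
      rw [show lo + 1 + hi = lo + hi + 1 by ring,
          PySem.Int.floordiv_eq_ediv_of_pos (by omega)] at hbounds
      obtain ⟨hma, hmb⟩ := hbounds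
      by_cases hmid : (lo + hi + 1) / 2 * ((lo + hi + 1) / 2) ≤ n
      · simpa [isqrtB, hlt, hmid] using
          ih ((lo + hi + 1) / 2) hi (by omega) (by omega) hmid hhisq (by omega)
      · have hrec := ih lo ((lo + hi + 1) / 2 - 1) hlo (by omega) hlosq
          (by rw [show (lo + hi + 1) / 2 - 1 + 1 = (lo + hi + 1) / 2 by ring]; omega)
          (by omega)
        simpa [isqrtB, hlt, hmid] using hrec
    · have : lo = hi := by omega
      subst this
      simpa [isqrtB, hlt] using ⟨hlosq, hhisq⟩

-- beats i ⇔ (2i-t)² ≤ d where d = t² - 4r - 1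
lemma beats_iff (t r i : Int) :
    (r < i * (t - i)) ↔ (2 * i - t) * (2 * i - t) ≤ t * t - 4 * r - 1 := by
  constructor <;> intro h <;> nlinarith

-- B's closed form is a boundary point whenever some beating point exists
lemma closed_form_boundary (t r i : Int) (hi : r < i * (t - i)) :
    r < closedFormB t r * (t - closedFormB t r) ∧
      ¬ r < (closedFormB t r + 1) * (t - (closedFormB t r + 1)) := by
  have hda : (2 * i - t) * (2 * i - t) ≤ t * t - 4 * r - 1 := (beats_iff t r i).mp hi
  set d : Int := t * t - 4 * r - 1 with hd
  have hd0 : 0 ≤ d := le_trans (mul_self_nonneg _) hda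
  have hs := isqrtB_spec d (d.toNat + 1) 0 d (le_refl 0) hd0 (by simpa using hd0)
    (by nlinarith) (by omega)
  set s : Int := isqrtB (d.toNat + 1) 0 d d with hsdef
  have hs0 : 0 ≤ s := by nlinarith [hs.1, hs.2]
  have halt : closedFormB t r = PySem.Int.floordiv (t + s) 2 := rfl
  rw [halt, PySem.Int.floordiv_eq_ediv_of_pos (by omega)]
  set m : Int := (t + s) / 2 with hm
  have hdm := Int.mul_ediv_add_emod (t + s) 2
  have hmod0 : 0 ≤ (t + s) % 2 := Int.emod_nonneg _ (by omega)
  have hmod1 : (t + s) % 2 < 2 := Int.emod_lt_of_pos _ (by omega)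
  -- e := 2m - t lies in {s-1, s}
  have he : 2 * m - t = s - 1 ∨ 2 * m - t = s := by omega
  constructor
  · rw [beats_iff]
    rcases he with he | he
    · by_cases hs1 : 1 ≤ s
      · nlinarith [hs.1]
      · -- s = 0 and t + s odd, so t is odd and (2i - t)² ≥ 1
        have hseq : s = 0 := by omega
        have htodd : 2 * m = t - 1 := by omega
        have hne : 2 * i - t ≠ 0 := by omega
        have h1 : 1 ≤ (2 * i - t) * (2 * i - t) := by
          rcases lt_or_gt_of_ne hne with h | h <;> nlinarith
        have hsq : (2 * m - t) * (2 * m - t) = 1 := by rw [he, hseq]; ring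
        linarith
    · calc (2 * m - t) * (2 * m - t) = s * s := by rw [he]
        _ ≤ d := hs.1
  · rw [beats_iff]
    have h2 : s + 1 ≤ 2 * (m + 1) - t := by omega
    have : (s + 1) * (s + 1) ≤ (2 * (m + 1) - t) * (2 * (m + 1) - t) := by nlinarith
    intro hcon
    linarith [hs.2]
-- ===== VERDICT (by name: the statement is the Claim_ definition above) =====
theorem find_last_beats_record_py_spec : Claim_equal_find_last_beats_record_py := by
  intro a b t r _ hpre
  obtain ⟨hab, hPa, hPb⟩ := hpre
  have hA := goA_fuel_spec t r ((b - a).toNat + 200) a b hab hPa hPb (by omega)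
  have hB := closed_form_boundary t r a hPa
  unfold Spec_find_last_beats_record_py find_last_beats_record_py
  have halt : find_last_beats_record_py_alt a b t r = closedFormB t r := by
    simp [find_last_beats_record_py_alt, beatsRecordPy, hab, hPa, hPb]
  rw [halt]
  exact boundary_uniq t r _ _ hA.1 hA.2 hB.1 hB.2
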